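-- pv_equiv track=rewrite | github.com/gabCodes/AdventofCode | Q2.py | rowMonotone
-- ===== SOURCE A (Python) =====
-- def rowMonotone(row: list[int]) -> bool:
--     #Discard invalid case where two initial elements are equal
--     if row[1] == row[0]:
--         return False
--
--     ascending = row[1] > row[0]
--
--     for i in range(len(row) - 1):
--         if ascending and row[i+1] > row[i]:
--             continue
--
--         elif not ascending and row[i+1] < row[i]:
--             continue
--
--         else:
--             return False
--
--     return True
-- ===== SOURCE B (Python) =====
-- def rowMonotone(row: list[int]) -> bool:
--     pairs = list(zip(row, row[1:]))
--     inc = all(a < b for a, b in pairs)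
--     dec = all(a > b for a, b in pairs)
--     return inc or dec
-- ===== Notes on version B (the rewrite author's own statement) =====
-- stated objective: idiomatic
-- what changed: Replaces A's direction-fixed index loop (with its up-front equality guard and row[i]/row[i+1] indexing) by two independent all() scans over zipped adjacent pairs, returning inc or dec.
import Mathlib
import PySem

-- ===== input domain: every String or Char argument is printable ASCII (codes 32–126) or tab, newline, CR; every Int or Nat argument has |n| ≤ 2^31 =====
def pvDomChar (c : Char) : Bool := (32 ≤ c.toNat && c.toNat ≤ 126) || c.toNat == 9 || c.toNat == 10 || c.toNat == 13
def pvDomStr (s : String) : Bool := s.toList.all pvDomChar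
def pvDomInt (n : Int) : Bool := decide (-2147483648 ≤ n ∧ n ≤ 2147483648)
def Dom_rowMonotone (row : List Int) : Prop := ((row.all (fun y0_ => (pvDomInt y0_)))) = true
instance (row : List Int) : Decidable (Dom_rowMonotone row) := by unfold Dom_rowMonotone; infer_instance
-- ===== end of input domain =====

-- B changes the decomposition (two zip-based all scans instead of A's direction-fixed index loop); equality of return values is proved on rows of length ≥ 2.

-- ===== PORT A =====
-- the 'for i in range(len(row)-1)' loop: i is the current index, the second argument the remaining iteration count
def rowMonotoneLoop (row : List Int) (ascending : Bool) : Nat → Nat → Bool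
  | _, 0 => true
  | i, n+1 =>
    match PySem.List.pyGet? row ((i : Int) + 1), PySem.List.pyGet? row (i : Int) with
    | some x, some y =>
      if ascending && decide (x > y) then rowMonotoneLoop row ascending (i+1) n
      else if !ascending && decide (x < y) then rowMonotoneLoop row ascending (i+1) n
      else false
    | _, _ => false   -- unreachable: indices stay in range

def rowMonotone (row : List Int) : Bool :=
  match PySem.List.pyGet? row 1, PySem.List.pyGet? row 0 with
  | some r1, some r0 =>
    if r1 == r0 then false
    else
      let ascending := decide (r1 > r0)
      rowMonotoneLoop row ascending 0 (row.length - 1)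
  | _, _ => false   -- Python raises IndexError here; excluded by Pre_

-- ===== PORT B =====
def rowMonotone_alt (row : List Int) : Bool :=
  let pairs := row.zip (PySem.List.slice row (some 1) none)
  let inc := pairs.all (fun p => decide (p.1 < p.2))
  let dec := pairs.all (fun p => decide (p.1 > p.2))
  inc || dec

-- ===== PRECONDITION & SPEC =====
-- Pre_ excludes exactly the rows of length < 2, on which A raises IndexError at row[1]
def Pre_rowMonotone (row : List Int) : Prop := 2 ≤ row.length
instance (row : List Int) : Decidable (Pre_rowMonotone row) := by unfold Pre_rowMonotone; infer_instance
def pvWitness_rowMonotone : List Int := [1, 2, 3]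

def Spec_rowMonotone (row : List Int) (out : Bool) : Prop := out = rowMonotone_alt row
instance (row : List Int) (out : Bool) : Decidable (Spec_rowMonotone row out) := by unfold Spec_rowMonotone; infer_instance

-- ===== CLAIM (what is proved, stated in full; the proofs are below) =====
def Claim_equal_rowMonotone : Prop := ∀ (row : List Int), Dom_rowMonotone row → Pre_rowMonotone row → Spec_rowMonotone row (rowMonotone row)

-- ===== LEMMAS AND PROOFS =====

-- shifting the list by one cell while shifting the index by one leaves the loop unchanged
theorem rowMonotoneLoop_shift (a : Int) (row : List Int) (asc : Bool) :
    ∀ n i, rowMonotoneLoop (a :: row) asc (i+1) n = rowMonotoneLoop row asc i n := by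
  intro n
  induction n with
  | zero => intro i; rfl
  | succ n ih =>
    intro i
    have h1 : ((i+1 : Nat) : Int) + 1 = ((i+2 : Nat) : Int) := by push_cast; ring
    have h2 : ((i : Nat) : Int) + 1 = ((i+1 : Nat) : Int) := by push_cast; ring
    simp only [rowMonotoneLoop, h1, h2, PySem.List.pyGet?_natCast,
      List.getElem?_cons_succ, ih]

-- the loop run from index 0 over length-1 steps checks every adjacent pair in the fixed direction
theorem rowMonotoneLoop_eq_all (asc : Bool) :
    ∀ row : List Int, rowMonotoneLoop row asc 0 (row.length - 1) =
      (row.zip row.tail).all (fun p => if asc then decide (p.1 < p.2) else decide (p.1 > p.2)) := by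
  intro row
  induction row with
  | nil => rfl
  | cons a t ih =>
    cases t with
    | nil => rfl
    | cons b u =>
      have hb : PySem.List.pyGet? (a :: b :: u) ((0 : Nat) + 1 : Int) = some b := by
        simp
      have ha : PySem.List.pyGet? (a :: b :: u) ((0 : Nat) : Int) = some a := by
        simp
      have hlen : (a :: b :: u).length - 1 = u.length + 1 := by simp
      rw [hlen]
      simp only [rowMonotoneLoop, hb, ha]
      have hshift : rowMonotoneLoop (a :: b :: u) asc (0 + 1) u.length =
          rowMonotoneLoop (b :: u) asc 0 u.length := rowMonotoneLoop_shift a (b :: u) asc u.length 0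
      have ih' : rowMonotoneLoop (b :: u) asc 0 u.length =
          ((b :: u).zip (b :: u).tail).all fun p => if asc = true then decide (p.1 < p.2) else decide (p.1 > p.2) := by
        have hl : (b :: u).length - 1 = u.length := by simp
        rw [← hl]; exact ih
      cases asc with
      | false =>
        by_cases h : b < a
        · simp [h, hshift, ih', List.all_cons]
        · simp [h, List.all_cons]
      | true =>
        by_cases h : a < b
        · simp [h, hshift, ih', List.all_cons]
        · simp [h, List.all_cons]

-- ===== VERDICT (by name: the statement is the Claim_ definition above) =====
theorem rowMonotone_spec : Claim_equal_rowMonotone := by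
  intro row _hdom hpre
  unfold Pre_rowMonotone at hpre
  match row, hpre with
  | a :: b :: t, _ =>
    unfold Spec_rowMonotone rowMonotone rowMonotone_alt
    have h1 : PySem.List.pyGet? (a :: b :: t) 1 = some b := by simp
    have h0 : PySem.List.pyGet? (a :: b :: t) 0 = some a := by simp
    rw [h1, h0]
    have hsl : PySem.List.slice (a :: b :: t) (some 1) none = b :: t := by
      rw [PySem.List.slice_from_one]; rfl
    simp only [hsl]
    by_cases he : b = a
    · subst he
      simp [List.all_cons]
    · simp only [beq_iff_eq, he, if_false]
      have := rowMonotoneLoop_eq_all (decide (b > a)) (a :: b :: t)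
      rw [this]
      by_cases h : b > a
      · -- ascending: the decreasing all fails on the first pair
        simp [h, List.all_cons, not_lt.mpr (le_of_lt h), List.zip]
      · have h' : a > b := lt_of_le_of_ne (le_of_not_gt h) he
        simp [h, List.all_cons, List.zip]
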